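-- pv_equiv track=rewrite | github.com/Sungshine/BioFirstAidKit | stx/run_SPAdes.py | wranglePairedEnds
-- ===== SOURCE A (Python) =====
-- def wranglePairedEnds(path):
--     """ Match paired-end read files.
--
--     """
--     pair_hash = {}
--     for file in path:
--         newfile = ""
--         if '_R1' in file:
--             newfile = file.replace('_R1', '_R*')
--         elif '_R2' in file:
--             newfile = file.replace('_R2', '_R*')
--         if newfile not in pair_hash:
--             pair_hash[newfile] = [file]
--         else:
--             pair_hash[newfile].append(file)
--     return pair_hash
-- ===== SOURCE B (Python) =====
-- def wranglePairedEnds(path):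
--     """ Match paired-end read files. """
--     def key(f):
--         if '_R1' in f:
--             return f.replace('_R1', '_R*')
--         if '_R2' in f:
--             return f.replace('_R2', '_R*')
--         return ""
--     keys = list(dict.fromkeys(key(f) for f in path))
--     return {k: [f for f in path if key(f) == k] for k in keys}
-- ===== Notes on version B (the rewrite author's own statement) =====
-- stated objective: alternative
-- what changed: Replaces the one-pass mutating dict accumulation (insert-or-append per file) with a two-phase gather: compute the normalized key per file, dedup the keys in first-occurrence order, then build each group with a filter over the input.
import Mathlib
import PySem

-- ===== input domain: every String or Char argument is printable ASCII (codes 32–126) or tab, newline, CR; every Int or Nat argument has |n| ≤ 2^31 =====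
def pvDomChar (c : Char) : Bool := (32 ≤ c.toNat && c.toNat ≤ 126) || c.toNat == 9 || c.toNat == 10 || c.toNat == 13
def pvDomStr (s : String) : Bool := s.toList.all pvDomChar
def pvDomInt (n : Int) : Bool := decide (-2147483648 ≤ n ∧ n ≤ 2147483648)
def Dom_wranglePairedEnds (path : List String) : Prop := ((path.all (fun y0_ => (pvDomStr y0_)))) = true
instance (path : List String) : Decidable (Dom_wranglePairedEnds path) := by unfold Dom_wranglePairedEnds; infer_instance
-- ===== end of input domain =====

-- B groups the files in two phases (normalized keys deduped in first-occurrence order, then one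
-- filter per key) instead of A's one-pass insert-or-append dict accumulation; objective: alternative
-- decomposition of the same cost class, not claimed faster.

-- ===== PORT A =====
def wranglePairedEnds (path : List String) : List (String × List String) :=
  (path.foldl (fun pair_hash file =>
      let newfile : String := ""
      let newfile :=
        if PySem.Str.isIn "_R1" file then PySem.Str.replace file "_R1" "_R*"
        else if PySem.Str.isIn "_R2" file then PySem.Str.replace file "_R2" "_R*"
        else newfile
      if pair_hash.contains newfile = false then pair_hash.insert newfile [file]
      else pair_hash.modify newfile [] (fun l => l ++ [file]))
    PySem.Dict.empty).items

-- ===== PORT B =====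
-- B's helper 'key'
def pvKey (f : String) : String :=
  if PySem.Str.isIn "_R1" f then PySem.Str.replace f "_R1" "_R*"
  else if PySem.Str.isIn "_R2" f then PySem.Str.replace f "_R2" "_R*"
  else ""

def wranglePairedEnds_alt (path : List String) : List (String × List String) :=
  (PySem.List.dedup (path.map pvKey)).map
    (fun k => (k, path.filter (fun f => pvKey f == k)))

-- ===== PRECONDITION & SPEC =====
def Spec_wranglePairedEnds (path : List String) (out : List (String × List String)) : Prop := out = wranglePairedEnds_alt path
instance (path : List String) (out : List (String × List String)) : Decidable (Spec_wranglePairedEnds path out) := by unfold Spec_wranglePairedEnds; infer_instance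

-- ===== CLAIM (what is proved, stated in full; the proofs are below) =====
def Claim_equal_wranglePairedEnds : Prop := ∀ (path : List String), Dom_wranglePairedEnds path → Spec_wranglePairedEnds path (wranglePairedEnds path)

-- ===== LEMMAS AND PROOFS =====

theorem wranglePairedEnds_eq_alt (path : List String) :
    wranglePairedEnds path = wranglePairedEnds_alt path := by
  -- A's loop body equals a single Dict.modify with key 'pvKey file'
  have hstep : (fun (d : PySem.Dict String (List String)) (file : String) =>
      let newfile : String := ""
      let newfile :=
        if PySem.Str.isIn "_R1" file then PySem.Str.replace file "_R1" "_R*"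
        else if PySem.Str.isIn "_R2" file then PySem.Str.replace file "_R2" "_R*"
        else newfile
      if d.contains newfile = false then d.insert newfile [file]
      else d.modify newfile [] (fun l => l ++ [file]))
      = fun d file => d.modify (pvKey file) [] (fun l => l ++ [file]) := by
    funext d file
    show (if d.contains (pvKey file) = false then d.insert (pvKey file) [file]
          else d.modify (pvKey file) [] (fun l => l ++ [file]))
        = d.modify (pvKey file) [] (fun l => l ++ [file])
    by_cases h : d.contains (pvKey file)
    · simp [h]
    · simp [h, PySem.Dict.modify, PySem.Dict.getD_of_not_contains]
  unfold wranglePairedEnds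
  rw [hstep]
  set D := path.foldl (fun d file => d.modify (pvKey file) [] (fun l => l ++ [file])) PySem.Dict.empty with hD
  have hkeys : D.keys = PySem.List.dedup (path.map pvKey) := by
    rw [hD, PySem.Dict.keys_foldl_modify_key]
    simp [PySem.Set.update_nil_left]
  have hnodup : D.keys.Nodup := by
    rw [hkeys]; exact PySem.List.nodup_dedup _
  have hgetD : ∀ k, D.getD k [] = path.filter (fun f => pvKey f == k) := by
    intro k
    rw [hD]
    have h2 := PySem.Dict.getD_foldl_modify_append (path.map (fun f => (pvKey f, f))) PySem.Dict.empty k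
    rw [List.foldl_map] at h2
    simp only [h2]
    simp [List.filter_map, Function.comp_def]
  rw [PySem.Dict.items_eq_map_keys D hnodup [], hkeys, wranglePairedEnds_alt]
  simp [hgetD]

-- ===== VERDICT (by name: the statement is the Claim_ definition above) =====
theorem wranglePairedEnds_spec : Claim_equal_wranglePairedEnds := by
  intro path _
  unfold Spec_wranglePairedEnds
  exact wranglePairedEnds_eq_alt path
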